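-- pv_equiv track=rewrite | github.com/Arseniy2059/The-cipher-is-too-old | Праект.py | f
-- ===== SOURCE A (Python) =====
-- def f(p):
--     a = 1
--     s = ''
--     while a < p:
--         b = a + 1
--         while b < p:
--             if p %(a+b) == 0:
--                 s += str(a) + str(b)
--             b += 1
--         a += 1
--     return s
-- ===== SOURCE B (Python) =====
-- def f(p):
--     if p < 2:
--         return ''
--     divs = [d for d in range(1, p + 1) if p % d == 0]
--     parts = []
--     for a in range(1, p):
--         for d in divs:
--             if 2 * a + 1 <= d <= a + p - 1:
--                 parts.append(str(a) + str(d - a))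
--     return ''.join(parts)
-- ===== Notes on version B (the rewrite author's own statement) =====
-- stated objective: faster
-- what changed: Instead of testing divisibility of p by a+b for every pair a<b<p (O(p^2)), B precomputes the divisor list of p once and, for each a, scans only the divisors d in the window [2a+1, a+p-1], emitting str(a)+str(d-a).
import Mathlib
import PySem

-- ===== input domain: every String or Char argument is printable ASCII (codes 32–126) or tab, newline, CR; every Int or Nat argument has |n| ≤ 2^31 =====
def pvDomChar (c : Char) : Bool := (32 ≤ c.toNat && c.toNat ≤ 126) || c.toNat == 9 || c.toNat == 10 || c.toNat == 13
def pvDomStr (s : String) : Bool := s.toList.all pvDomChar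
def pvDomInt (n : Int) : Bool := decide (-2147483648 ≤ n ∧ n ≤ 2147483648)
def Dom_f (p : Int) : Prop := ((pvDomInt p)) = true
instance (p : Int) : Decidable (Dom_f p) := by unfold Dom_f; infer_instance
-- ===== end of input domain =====

-- B precomputes the divisor list of p once and, per a, scans only divisors in the window [2a+1, a+p-1]; measurably faster than A's pairwise scan.


-- ===== PORT A =====
-- inner while loop: 'while b < p: if p % (a+b) == 0: s += str(a)+str(b); b += 1'
def fInner (p a b : Int) (s : String) : String :=
  if h : b < p then
    fInner p a (b + 1)
      (if PySem.Int.mod p (a + b) == 0 then s ++ (PySem.Int.toStr a ++ PySem.Int.toStr b) else s)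
  else s
termination_by (p - b).toNat
decreasing_by omega

-- outer while loop: 'while a < p: <inner with b = a+1>; a += 1'
def fOuter (p a : Int) (s : String) : String :=
  if h : a < p then
    fOuter p (a + 1) (fInner p a (a + 1) s)
  else s
termination_by (p - a).toNat
decreasing_by omega

def f (p : Int) : String := fOuter p 1 ""

-- ===== PORT B =====
def f_alt (p : Int) : String :=
  if p < 2 then "" else
    let divs := (PySem.List.pyRange 1 (p + 1) 1).filter (fun d => PySem.Int.mod p d == 0)
    let parts := (PySem.List.pyRange 1 p 1).foldl (fun acc a =>
      divs.foldl (fun acc2 d =>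
        if 2 * a + 1 ≤ d ∧ d ≤ a + p - 1 then
          acc2 ++ [PySem.Int.toStr a ++ PySem.Int.toStr (d - a)]
        else acc2) acc) []
    PySem.Str.join "" parts

-- ===== PRECONDITION & SPEC =====
def Spec_f (p : Int) (out : String) : Prop := out = f_alt p
instance (p : Int) (out : String) : Decidable (Spec_f p out) := by unfold Spec_f; infer_instance

-- ===== CLAIM (what is proved, stated in full; the proofs are below) =====
def Claim_equal_f : Prop := ∀ (p : Int), Dom_f p → Spec_f p (f p)

-- ===== LEMMAS AND PROOFS =====

-- the characters contributed by the pair (a, b)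
def gAB (a b : Int) : List Char := PySem.Int.toChars a ++ PySem.Int.toChars b

theorem fInner_toList (p a : Int) : ∀ (b : Int) (s : String),
    (fInner p a b s).toList =
      s.toList ++ ((PySem.List.pyRange b p 1).filter
        (fun x => PySem.Int.mod p (a + x) == 0)).flatMap (fun x => gAB a x) := by
  intro b s
  induction b, s using fInner.induct p a with
  | case1 b s hb ih =>
    simp only [dite_eq_ite] at ih
    rw [fInner, dif_pos hb, ih, PySem.List.pyRange_one_cons hb]
    by_cases hc : PySem.Int.mod p (a + b) == 0
    · simp [hc, gAB, PySem.Int.toList_toStr, List.append_assoc]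
    · simp [hc]
  | case2 b s hb =>
    rw [fInner, dif_neg hb, PySem.List.pyRange_one_eq_nil (by omega)]
    simp

theorem fOuter_toList (p : Int) : ∀ (a : Int) (s : String),
    (fOuter p a s).toList =
      s.toList ++ (PySem.List.pyRange a p 1).flatMap (fun a' =>
        ((PySem.List.pyRange (a' + 1) p 1).filter
          (fun x => PySem.Int.mod p (a' + x) == 0)).flatMap (fun x => gAB a' x)) := by
  intro a s
  induction a, s using fOuter.induct p with
  | case1 a s ha ih =>
    rw [fOuter, dif_pos ha, ih, fInner_toList, PySem.List.pyRange_one_cons ha]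
    simp [List.append_assoc]
  | case2 a s ha =>
    rw [fOuter, dif_neg ha, PySem.List.pyRange_one_eq_nil (by omega)]
    simp

theorem join_nil_flatten (L : List (List Char)) : PySem.Chars.join [] L = L.flatten := by
  induction L with
  | nil => rfl
  | cons x t ih =>
    cases t with
    | nil => simp [PySem.Chars.join, List.intercalate]
    | cons y u =>
      simp only [PySem.Chars.join, List.intercalate] at *
      simp [List.intersperse] at *
      simpa using ih

theorem join_toList (parts : List String) :
    (PySem.Str.join "" parts).toList = parts.flatMap String.toList := by
  simp [PySem.Str.join, join_nil_flatten, List.flatMap]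

theorem f_alt_toList (p : Int) (hp : ¬ p < 2) :
    (f_alt p).toList =
      (PySem.List.pyRange 1 p 1).flatMap (fun a =>
        (((PySem.List.pyRange 1 (p + 1) 1).filter (fun d => PySem.Int.mod p d == 0)).filter
          (fun d => decide (2 * a + 1 ≤ d ∧ d ≤ a + p - 1))).flatMap
            (fun d => PySem.Int.toChars a ++ PySem.Int.toChars (d - a))) := by
  rw [f_alt, if_neg hp]
  simp only [PySem.List.foldl_append_ite]
  rw [PySem.List.foldl_append_eq_flatMap]
  rw [join_toList]
  simp [List.flatMap_map, List.flatMap_assoc, PySem.Int.toList_toStr, String.toList_append]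

theorem pyRange_map_add (c lo hi : Int) :
    (PySem.List.pyRange lo hi 1).map (fun b => c + b) = PySem.List.pyRange (c + lo) (c + hi) 1 := by
  rw [PySem.List.pyRange_one, PySem.List.pyRange_one, List.map_map]
  have : c + hi - (c + lo) = hi - lo := by ring
  rw [this]
  exact List.map_congr_left (fun k _ => by simp; ring)

theorem filters_eq (p a : Int) (ha1 : 1 ≤ a) (hap : a < p) (hp : 2 ≤ p) :
    (PySem.List.pyRange (2 * a + 1) (a + p) 1).filter (fun d => PySem.Int.mod p d == 0) =
    ((PySem.List.pyRange 1 (p + 1) 1).filter (fun d => PySem.Int.mod p d == 0)).filter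
      (fun d => decide (2 * a + 1 ≤ d ∧ d ≤ a + p - 1)) := by
  have hsplitL : PySem.List.pyRange 1 (a + p) 1 =
      PySem.List.pyRange 1 (2 * a + 1) 1 ++ PySem.List.pyRange (2 * a + 1) (a + p) 1 :=
    PySem.List.pyRange_one_append _ _ _ (by omega) (by omega)
  have hsplitR : PySem.List.pyRange 1 (a + p) 1 =
      PySem.List.pyRange 1 (p + 1) 1 ++ PySem.List.pyRange (p + 1) (a + p) 1 :=
    PySem.List.pyRange_one_append _ _ _ (by omega) (by omega)
  set Q : Int → Bool := fun d => decide (2 * a + 1 ≤ d ∧ d ≤ a + p - 1) && (PySem.Int.mod p d == 0) with hQ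
  have hL : (PySem.List.pyRange (2 * a + 1) (a + p) 1).filter (fun d => PySem.Int.mod p d == 0) =
      (PySem.List.pyRange 1 (a + p) 1).filter Q := by
    rw [hsplitL, List.filter_append]
    have h1 : (PySem.List.pyRange 1 (2 * a + 1) 1).filter Q = [] := by
      rw [List.filter_eq_nil_iff]
      intro d hd
      rw [PySem.List.mem_pyRange_one] at hd
      simp [hQ]
      omega
    have h2 : (PySem.List.pyRange (2 * a + 1) (a + p) 1).filter Q =
        (PySem.List.pyRange (2 * a + 1) (a + p) 1).filter (fun d => PySem.Int.mod p d == 0) := by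
      apply List.filter_congr
      intro d hd
      rw [PySem.List.mem_pyRange_one] at hd
      simp [hQ]
      intro _
      constructor <;> omega
    rw [h1, h2, List.nil_append]
  have hR : ((PySem.List.pyRange 1 (p + 1) 1).filter (fun d => PySem.Int.mod p d == 0)).filter
      (fun d => decide (2 * a + 1 ≤ d ∧ d ≤ a + p - 1)) = (PySem.List.pyRange 1 (a + p) 1).filter Q := by
    rw [List.filter_filter, hsplitR, List.filter_append]
    have h1 : (PySem.List.pyRange (p + 1) (a + p) 1).filter Q = [] := by
      rw [List.filter_eq_nil_iff]
      intro d hd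
      rw [PySem.List.mem_pyRange_one] at hd
      have hm : PySem.Int.mod p d = p := by
        rw [PySem.Int.mod_eq_emod_of_pos (by omega)]
        exact Int.emod_eq_of_lt (by omega) (by omega)
      simp [hQ, hm]
      omega
    rw [h1, List.append_nil]
  rw [hL, hR]

theorem inner_eq (p a : Int) (ha1 : 1 ≤ a) (hap : a < p) (hp : 2 ≤ p) :
    ((PySem.List.pyRange (a + 1) p 1).filter
        (fun x => PySem.Int.mod p (a + x) == 0)).flatMap (fun x => gAB a x) =
    (((PySem.List.pyRange 1 (p + 1) 1).filter (fun d => PySem.Int.mod p d == 0)).filter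
        (fun d => decide (2 * a + 1 ≤ d ∧ d ≤ a + p - 1))).flatMap
          (fun d => PySem.Int.toChars a ++ PySem.Int.toChars (d - a)) := by
  rw [← filters_eq p a ha1 hap hp]
  have hshift : (PySem.List.pyRange (2 * a + 1) (a + p) 1).filter (fun d => PySem.Int.mod p d == 0) =
      ((PySem.List.pyRange (a + 1) p 1).filter (fun x => PySem.Int.mod p (a + x) == 0)).map
        (fun b => a + b) := by
    have : (2 : Int) * a + 1 = a + (a + 1) := by ring
    rw [this, ← pyRange_map_add a (a + 1) p, List.filter_map]
    rfl
  rw [hshift, List.flatMap_map]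
  apply List.flatMap_congr
  intro x _
  simp [gAB]

theorem f_eq_alt (p : Int) : f p = f_alt p := by
  by_cases hp : p < 2
  · rw [f, fOuter, dif_neg (by omega), f_alt, if_pos hp]
  · have h : (f p).toList = (f_alt p).toList := by
      rw [f, fOuter_toList, f_alt_toList p hp]
      simp only [String.toList_empty, List.nil_append]
      apply List.flatMap_congr
      intro a ha
      rw [PySem.List.mem_pyRange_one] at ha
      exact inner_eq p a ha.1 ha.2 (by omega)
    have := congrArg String.ofList h
    simpa [String.ofList_toList] using this

-- ===== VERDICT (by name: the statement is the Claim_ definition above) =====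
theorem f_spec : Claim_equal_f := by
  intro p _
  exact f_eq_alt p
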